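-- pv_equiv track=rewrite | github.com/charmoniumQ/EDGAR-research | util/paragraphs.py | group_paragraphs1
-- ===== SOURCE A (Python) =====
-- def is_heading(paragraph):
--     return len(paragraph) == 1
--
-- def get_heading(paragraph):
--     return paragraph[0]
--
-- def group_paragraphs1(paragraphs):
--     heading = None
--     body = []
--     for paragraph in paragraphs:
--         if is_heading(paragraph):
--             yield (heading, body)
--             heading = get_heading(paragraph)
--             body = []
--         else:
--             body.append(paragraph)
--     yield (heading, body)
-- ===== SOURCE B (Python) =====
-- def group_paragraphs1(paragraphs):
--     ps = list(paragraphs)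
--     n = len(ps)
--     heading = None
--     start = 0
--     while True:
--         j = start
--         while j < n and len(ps[j]) != 1:
--             j += 1
--         yield (heading, ps[start:j])
--         if j == n:
--             return
--         heading = ps[j][0]
--         start = j + 1
-- ===== Notes on version B (the rewrite author's own statement) =====
-- stated objective: alternative
-- what changed: B materializes the input and emits each group by scanning forward to the next heading index and slicing, instead of A's single fold that appends each paragraph to a mutable body accumulator.
import Mathlib
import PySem

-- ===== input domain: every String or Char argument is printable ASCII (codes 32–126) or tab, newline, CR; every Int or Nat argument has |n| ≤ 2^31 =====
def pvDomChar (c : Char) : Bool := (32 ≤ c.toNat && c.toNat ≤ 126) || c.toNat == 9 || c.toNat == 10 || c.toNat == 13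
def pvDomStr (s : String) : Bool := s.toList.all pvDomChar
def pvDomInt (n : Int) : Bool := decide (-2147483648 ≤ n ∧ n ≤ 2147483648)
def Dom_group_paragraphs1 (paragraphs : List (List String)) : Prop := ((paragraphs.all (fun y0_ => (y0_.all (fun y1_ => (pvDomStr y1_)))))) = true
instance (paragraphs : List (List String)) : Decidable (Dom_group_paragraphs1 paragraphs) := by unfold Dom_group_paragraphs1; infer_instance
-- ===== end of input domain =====

-- B groups by scanning forward to the next heading index and slicing, instead of A's
-- single fold with a body accumulator; alternative decomposition, same output order.

-- ===== PORT A =====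
-- A's generator, realized as the list of yielded tuples: a fold over the input
-- carrying (heading, body, yielded-so-far); 'get_heading' (paragraph[0]) is head?
-- (always 'some' here since the branch guarantees length 1, so exact).
def pvStepA (st : Option String × List (List String) × List (Option String × List (List String)))
    (p : List String) : Option String × List (List String) × List (Option String × List (List String)) :=
  if p.length == 1 then (p.head?, [], st.2.2 ++ [(st.1, st.2.1)])
  else (st.1, st.2.1 ++ [p], st.2.2)

def group_paragraphs1 (paragraphs : List (List String)) : List (Option String × List (List String)) :=
  let st := paragraphs.foldl pvStepA (none, [], [])
  st.2.2 ++ [(st.1, st.2.1)]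

-- ===== PORT B =====
-- Source B's outer while-loop: from 'start', the inner while advances j past non-heading
-- paragraphs (j = start + length of the non-heading run), yields (heading, ps[start:j]),
-- stops when j == n, else continues after the heading at j.  On every reachable state
-- j ≤ ps.length, so Python's 'j == n' test is written 'ps.length ≤ j' (totality guard only).
def pvAltGo (ps : List (List String)) (heading : Option String) (start : Nat) :
    List (Option String × List (List String)) :=
  let j := start + ((ps.drop start).takeWhile (fun p => p.length ≠ 1)).length
  let body := (ps.drop start).take (j - start)
  if _h : ps.length ≤ j then [(heading, body)]
  else (heading, body) :: pvAltGo ps ((ps.getD j []).head?) (j + 1)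
termination_by ps.length - start
decreasing_by omega

def group_paragraphs1_alt (paragraphs : List (List String)) : List (Option String × List (List String)) :=
  pvAltGo paragraphs none 0

-- ===== PRECONDITION & SPEC =====
def Spec_group_paragraphs1 (paragraphs : List (List String)) (out : List (Option String × List (List String))) : Prop := out = group_paragraphs1_alt paragraphs
instance (paragraphs : List (List String)) (out : List (Option String × List (List String))) : Decidable (Spec_group_paragraphs1 paragraphs out) := by unfold Spec_group_paragraphs1; infer_instance

-- ===== CLAIM (what is proved, stated in full; the proofs are below) =====
def Claim_equal_group_paragraphs1 : Prop := ∀ (paragraphs : List (List String)), Dom_group_paragraphs1 paragraphs → Spec_group_paragraphs1 paragraphs (group_paragraphs1 paragraphs)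

-- ===== LEMMAS AND PROOFS =====

-- Structural middle-man (proof tool): the grouping, by recursion on the list.
def pvGp : List (List String) → Option String → List (Option String × List (List String))
  | [], h => [(h, [])]
  | p :: rest, h =>
    if p.length = 1 then (h, []) :: pvGp rest p.head?
    else match pvGp rest h with
      | [] => []
      | (h', b') :: t => (h', p :: b') :: t

-- prepend extra paragraphs to the first group's body
def pvConsBody (b : List (List String)) :
    List (Option String × List (List String)) → List (Option String × List (List String))
  | [] => []
  | (h, b') :: t => (h, b ++ b') :: t

theorem pvGp_cons_not_heading (p : List String) (rest : List (List String)) (h : Option String)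
    (hp : ¬ p.length = 1) : pvGp (p :: rest) h = pvConsBody [p] (pvGp rest h) := by
  simp only [pvGp, if_neg hp]
  rcases pvGp rest h with _ | ⟨⟨h', b'⟩, t⟩ <;> simp [pvConsBody]

theorem pvConsBody_consBody (a b : List (List String))
    (l : List (Option String × List (List String))) :
    pvConsBody a (pvConsBody b l) = pvConsBody (a ++ b) l := by
  cases l with
  | nil => rfl
  | cons x t => cases x; simp [pvConsBody]

theorem pvGp_of_dropWhile_nil (rest : List (List String)) (h : Option String)
    (hdw : rest.dropWhile (fun p => p.length ≠ 1) = []) : pvGp rest h = [(h, rest)] := by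
  induction rest generalizing h with
  | nil => simp [pvGp]
  | cons p rest ih =>
    rw [List.dropWhile_cons] at hdw
    by_cases hp : p.length = 1
    · rw [if_neg (by simp [hp])] at hdw
      exact absurd hdw (by simp)
    · rw [if_pos (by simp [hp])] at hdw
      rw [pvGp_cons_not_heading p rest h hp, ih h hdw]
      simp [pvConsBody]

theorem pvGp_of_dropWhile_cons (rest : List (List String)) (h : Option String)
    (q : List String) (rest' : List (List String))
    (hdw : rest.dropWhile (fun p => p.length ≠ 1) = q :: rest') :
    pvGp rest h = (h, rest.takeWhile (fun p => p.length ≠ 1)) :: pvGp rest' q.head? := by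
  induction rest generalizing h with
  | nil => simp at hdw
  | cons p rest ih =>
    rw [List.dropWhile_cons] at hdw
    rw [List.takeWhile_cons]
    by_cases hp : p.length = 1
    · rw [if_neg (by simp [hp])] at hdw
      obtain ⟨rfl, rfl⟩ := List.cons.injEq .. ▸ hdw
      rw [if_neg (by simp [hp])]
      simp only [pvGp, if_pos hp]
    · rw [if_pos (by simp [hp])] at hdw
      rw [if_pos (by simp [hp])]
      rw [pvGp_cons_not_heading p rest h hp, ih h hdw]
      simp [pvConsBody]

-- A's fold, started in any state, equals the already-yielded prefix followed by
-- pvGp with the pending body prepended to its first group.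
theorem pvLoopA (rest : List (List String)) : ∀ (heading : Option String)
    (body : List (List String)) (out : List (Option String × List (List String))),
    (let st := rest.foldl pvStepA (heading, body, out); st.2.2 ++ [(st.1, st.2.1)])
      = out ++ pvConsBody body (pvGp rest heading) := by
  induction rest with
  | nil => intro h b out; simp [pvGp, pvConsBody]
  | cons p rest ih =>
    intro h b out
    by_cases hp : p.length = 1
    · simp only [List.foldl_cons, pvStepA, beq_iff_eq, if_pos hp]
      rw [ih]
      simp only [pvGp, if_pos hp]
      rcases pvGp rest p.head? with _ | ⟨⟨h', b'⟩, t⟩ <;>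
        simp [pvConsBody]
    · simp only [List.foldl_cons, pvStepA, beq_iff_eq, if_neg hp]
      rw [ih, pvGp_cons_not_heading p rest h hp, pvConsBody_consBody]

-- B's index-based loop computes pvGp of the suffix from 'start'.
theorem pvAltGo_eq_gp (ps : List (List String)) : ∀ (start : Nat) (heading : Option String),
    start ≤ ps.length → pvAltGo ps heading start = pvGp (ps.drop start) heading := by
  have H : ∀ (k : Nat) (start : Nat) (heading : Option String),
      ps.length - start ≤ k → start ≤ ps.length →
      pvAltGo ps heading start = pvGp (ps.drop start) heading := by
    intro k
    induction k with
    | zero =>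
      intro start heading hk hle
      have hst : start = ps.length := by omega
      have hdrop : ps.drop start = [] := by simp [hst]
      rw [pvAltGo]
      rw [dif_pos (by rw [hdrop]; simp [hst])]
      rw [hdrop]
      simp [pvGp]
    | succ k ih =>
      intro start heading hk hle
      rw [pvAltGo]
      set rest := ps.drop start with hrestdef
      set tw := rest.takeWhile (fun p => p.length ≠ 1) with htwdef
      have hsplit : tw ++ rest.dropWhile (fun p => p.length ≠ 1) = rest :=
        List.takeWhile_append_dropWhile ..
      have hlen : rest.length = ps.length - start := by rw [hrestdef]; exact List.length_drop ..
      rcases hdw : rest.dropWhile (fun p => p.length ≠ 1) with _ | ⟨q, rest'⟩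
      · -- no heading in the suffix: the run is everything, j = n
        rw [hdw, List.append_nil] at hsplit
        have hlentw : tw.length = rest.length := by rw [hsplit]
        rw [dif_pos (by omega)]
        rw [pvGp_of_dropWhile_nil rest heading hdw]
        simp only [Nat.add_sub_cancel_left]
        rw [List.take_of_length_le (by omega)]
      · -- a heading exists, at index j = start + tw.length < n
        rw [hdw] at hsplit
        have hlen2 : tw.length + (rest'.length + 1) = rest.length := by
          have := congrArg List.length hsplit
          simpa using this
        rw [dif_neg (by omega)]
        rw [pvGp_of_dropWhile_cons rest heading q rest' hdw]
        have hbody : rest.take tw.length = tw := by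
          conv_lhs => rw [← hsplit]
          exact List.take_left ..
        have hdropt : rest.drop tw.length = q :: rest' := by
          conv_lhs => rw [← hsplit]
          exact List.drop_left ..
        have h1 : (List.drop start ps)[tw.length]? = ps[start + tw.length]? :=
          List.getElem?_drop
        have h2 : rest[tw.length]? = some q := by
          have h3 := List.getElem?_drop (xs := rest) (i := tw.length) (j := 0)
          rw [hdropt] at h3
          simpa using h3.symm
        have hget : ps.getD (start + tw.length) [] = q := by
          rw [List.getD_eq_getElem?_getD, ← h1, h2]
          rfl
        have hdropps : ps.drop (start + tw.length + 1) = rest' := by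
          have h2 : rest.drop (tw.length + 1) = rest' := by
            rw [← List.drop_drop, hdropt]; rfl
          rw [hrestdef, List.drop_drop] at h2
          rw [← h2]
          ring_nf
        rw [ih (start + tw.length + 1) (ps.getD (start + tw.length) []).head? (by omega)
          (by omega)]
        rw [hdropps, hget]
        simp only [Nat.add_sub_cancel_left]
        rw [hbody]
  intro start heading hle
  exact H (ps.length - start) start heading le_rfl hle

-- ===== VERDICT (by name: the statement is the Claim_ definition above) =====
theorem group_paragraphs1_spec : Claim_equal_group_paragraphs1 := by
  intro ps _
  unfold Spec_group_paragraphs1 group_paragraphs1 group_paragraphs1_alt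
  rw [pvAltGo_eq_gp ps 0 none (Nat.zero_le _)]
  have hA := pvLoopA ps none [] []
  simp only [List.nil_append] at hA
  rw [hA]
  rcases hg : pvGp ps none with _ | ⟨⟨h, b⟩, t⟩ <;> simp [pvConsBody, hg]
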